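-- pv_equiv track=rewrite | github.com/VisActor/vinfo-graphics | vinfo-graphics-skill/scripts/fetch_icons.py | pick_icon_from_collection
-- ===== SOURCE A (Python) =====
-- def pick_icon_from_collection(icons, collection, category, used_icons):
--     """从指定集合中为类目选一个图标，避免重复"""
--     candidates = [ic for ic in icons if ic.startswith(f"{collection}:") and ic not in used_icons]
--     if not candidates:
--         # 退而用任意集合
--         candidates = [ic for ic in icons if ic not in used_icons]
--     if not candidates:
--         return None
--     # 优先选择名称中包含类目相关关键词的
--     category_lower = category.lower()
--     for c in candidates:
--         name_part = c.split(":")[-1] if ":" in c else c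
--         if category_lower in name_part.lower():
--             return c
--     return candidates[0]
-- ===== SOURCE B (Python) =====
-- def pick_icon_from_collection(icons, collection, category, used_icons):
--     """Single pass over icons with four first-seen trackers; no candidate lists built."""
--     cat = category.lower()
--     prefix = f"{collection}:"
--     first_coll_kw = first_coll = first_any_kw = first_any = None
--     for ic in icons:
--         if ic in used_icons:
--             continue
--         name_part = ic.split(":")[-1] if ":" in ic else ic
--         kw = cat in name_part.lower()
--         if ic.startswith(prefix):
--             if first_coll is None:
--                 first_coll = ic
--             if kw and first_coll_kw is None:
--                 first_coll_kw = ic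
--         if first_any is None:
--             first_any = ic
--         if kw and first_any_kw is None:
--             first_any_kw = ic
--     if first_coll is not None:
--         return first_coll_kw if first_coll_kw is not None else first_coll
--     if first_any is not None:
--         return first_any_kw if first_any_kw is not None else first_any
--     return None
-- ===== Notes on version B (the rewrite author's own statement) =====
-- stated objective: faster
-- what changed: Replaces A's two candidate-list builds plus a separate keyword scan with one single pass over icons that maintains four first-seen trackers (first collection match with/without keyword, first unused with/without keyword) and selects among them at the end.
import Mathlib
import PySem

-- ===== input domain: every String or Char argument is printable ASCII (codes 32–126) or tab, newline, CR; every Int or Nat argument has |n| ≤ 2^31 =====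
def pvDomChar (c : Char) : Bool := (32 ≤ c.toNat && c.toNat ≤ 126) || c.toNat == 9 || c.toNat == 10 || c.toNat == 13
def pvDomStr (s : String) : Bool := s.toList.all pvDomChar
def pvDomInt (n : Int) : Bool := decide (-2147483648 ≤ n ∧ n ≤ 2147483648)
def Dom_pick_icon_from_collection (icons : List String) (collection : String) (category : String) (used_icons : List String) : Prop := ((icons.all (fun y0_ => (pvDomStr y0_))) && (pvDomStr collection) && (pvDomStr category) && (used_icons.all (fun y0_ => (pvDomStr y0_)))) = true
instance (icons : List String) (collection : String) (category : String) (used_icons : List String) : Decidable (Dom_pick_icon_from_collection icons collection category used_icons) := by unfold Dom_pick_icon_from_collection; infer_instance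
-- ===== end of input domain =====

-- B replaces A's two candidate-list builds and keyword re-scan by ONE pass with four
-- first-seen trackers (single traversal, no intermediate lists).

-- name_part = c.split(":")[-1] if ":" in c else c   (both Pythons contain this expression).
-- split? is some for sep ":" ≠ "" and a split result is nonempty, so both getD defaults are dead.
def pvNamePart (c : String) : String :=
  if PySem.Str.isIn ":" c then
    (PySem.List.pyGet? ((PySem.Str.split? c ":").getD []) (-1)).getD c
  else c

-- ===== PORT A =====
-- the 'for c in candidates: … return c' loop of A
def pickA_go (catL : String) : List String → Option String
  | [] => none
  | c :: rest =>
      if PySem.Str.isIn catL (PySem.Str.lower (pvNamePart c)) then some c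
      else pickA_go catL rest

def pick_icon_from_collection (icons : List String) (collection : String) (category : String) (used_icons : List String) : Option String :=
  let candidates0 := icons.filter (fun ic => PySem.Str.startswith ic (collection ++ ":") && !(used_icons.contains ic))
  let candidates := if candidates0 = [] then icons.filter (fun ic => !(used_icons.contains ic)) else candidates0
  if candidates = [] then none
  else
    let catL := PySem.Str.lower category
    match pickA_go catL candidates with
    | some c => some c
    | none => PySem.List.pyGet? candidates 0

-- ===== PORT B =====
-- one step of B's single pass: update the four trackers for icon ic
def pickB_step (used : List String) (pfx catL : String)
    (s : Option String × Option String × Option String × Option String) (ic : String) :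
    Option String × Option String × Option String × Option String :=
  if used.contains ic then s
  else
    let kw := PySem.Str.isIn catL (PySem.Str.lower (pvNamePart ic))
    let fck := s.1; let fc := s.2.1; let fak := s.2.2.1; let fa := s.2.2.2
    let fc' := if PySem.Str.startswith ic pfx && fc.isNone then some ic else fc
    let fck' := if PySem.Str.startswith ic pfx && kw && fck.isNone then some ic else fck
    let fa' := if fa.isNone then some ic else fa
    let fak' := if kw && fak.isNone then some ic else fak
    (fck', fc', fak', fa')

def pick_icon_from_collection_alt (icons : List String) (collection : String) (category : String) (used_icons : List String) : Option String :=
  let catL := PySem.Str.lower category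
  let pfx := collection ++ ":"
  let s := icons.foldl (pickB_step used_icons pfx catL) (none, none, none, none)
  if s.2.1.isSome then (if s.1.isSome then s.1 else s.2.1)
  else if s.2.2.2.isSome then (if s.2.2.1.isSome then s.2.2.1 else s.2.2.2)
  else none

-- ===== PRECONDITION & SPEC =====
def Spec_pick_icon_from_collection (icons : List String) (collection : String) (category : String) (used_icons : List String) (out : Option String) : Prop := out = pick_icon_from_collection_alt icons collection category used_icons
instance (icons : List String) (collection : String) (category : String) (used_icons : List String) (out : Option String) : Decidable (Spec_pick_icon_from_collection icons collection category used_icons out) := by unfold Spec_pick_icon_from_collection; infer_instance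

-- ===== CLAIM (what is proved, stated in full; the proofs are below) =====
def Claim_equal_pick_icon_from_collection : Prop := ∀ (icons : List String) (collection : String) (category : String) (used_icons : List String), Dom_pick_icon_from_collection icons collection category used_icons → Spec_pick_icon_from_collection icons collection category used_icons (pick_icon_from_collection icons collection category used_icons)

-- ===== LEMMAS AND PROOFS =====

-- the three predicates both programs test
def pvKw (catL ic : String) : Bool := PySem.Str.isIn catL (PySem.Str.lower (pvNamePart ic))
def pvColl (used : List String) (pfx ic : String) : Bool :=
  PySem.Str.startswith ic pfx && !(used.contains ic)
def pvFree (used : List String) (ic : String) : Bool := !(used.contains ic)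

-- B's step, written with the named predicates
set_option maxHeartbeats 1000000 in
theorem pickB_step_eq (used : List String) (pfx catL : String)
    (a b c d : Option String) (ic : String) :
    pickB_step used pfx catL (a, b, c, d) ic =
      (if (pvColl used pfx ic && pvKw catL ic) && a.isNone then some ic else a,
       if pvColl used pfx ic && b.isNone then some ic else b,
       if (pvFree used ic && pvKw catL ic) && c.isNone then some ic else c,
       if pvFree used ic && d.isNone then some ic else d) := by
  by_cases hu : ic ∈ used <;>
    by_cases hs : PySem.Chars.startswith ic.toList pfx.toList <;>
    by_cases hk : PySem.Chars.isIn catL.toList (PySem.Chars.lower (pvNamePart ic).toList) <;>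
    cases a <;> cases b <;> cases c <;> cases d <;>
    simp [pickB_step, pvColl, pvFree, pvKw, hu, hs, hk]

-- updating a first-seen tracker then or-ing the rest = or-ing find? over the whole list
theorem or_find?_cons {α : Type} (a : Option α) (q : α → Bool) (x : α) (xs : List α) :
    (if q x && a.isNone then some x else a).or (List.find? q xs) =
      a.or (List.find? q (x :: xs)) := by
  cases a <;> by_cases hq : q x <;> simp [List.find?_cons, hq]

-- B's fold computes the four first matches (as find?'s), whatever the starting trackers
theorem pickB_fold (used : List String) (pfx catL : String) (l : List String)
    (a b c d : Option String) :
    l.foldl (pickB_step used pfx catL) (a, b, c, d) =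
      (a.or (l.find? (fun ic => pvColl used pfx ic && pvKw catL ic)),
       b.or (l.find? (fun ic => pvColl used pfx ic)),
       c.or (l.find? (fun ic => pvFree used ic && pvKw catL ic)),
       d.or (l.find? (fun ic => pvFree used ic))) := by
  induction l generalizing a b c d with
  | nil => simp
  | cons x xs ih =>
      rw [List.foldl_cons, pickB_step_eq, ih]
      refine Prod.ext ?_ (Prod.ext ?_ (Prod.ext ?_ ?_)) <;> simp only []
      · exact or_find?_cons a (fun ic => pvColl used pfx ic && pvKw catL ic) x xs
      · exact or_find?_cons b (fun ic => pvColl used pfx ic) x xs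
      · exact or_find?_cons c (fun ic => pvFree used ic && pvKw catL ic) x xs
      · exact or_find?_cons d (fun ic => pvFree used ic) x xs

-- A's keyword loop is find? with the keyword predicate
theorem pickA_go_eq (catL : String) (l : List String) :
    pickA_go catL l = l.find? (fun c => pvKw catL c) := by
  induction l with
  | nil => rfl
  | cons x xs ih =>
      simp only [pickA_go, List.find?_cons, pvKw]
      split <;> simp_all [pvKw]

theorem find?_filter' {α : Type} (l : List α) (p q : α → Bool) :
    (l.filter p).find? q = l.find? (fun x => p x && q x) := by
  induction l with
  | nil => rfl
  | cons x xs ih =>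
      by_cases hp : p x
      · by_cases hq : q x <;> simp [List.filter_cons, hp, hq, List.find?_cons, ih]
      · simp [List.filter_cons, hp, List.find?_cons, ih]

theorem head?_filter {α : Type} (l : List α) (p : α → Bool) :
    (l.filter p).head? = l.find? p := by
  induction l with
  | nil => rfl
  | cons x xs ih => by_cases hp : p x <;> simp [List.filter_cons, hp, List.find?_cons, ih]

theorem find?_none_of_imp {α : Type} (l : List α) (p q : α → Bool)
    (himp : ∀ x, q x → p x) (h : l.find? p = none) : l.find? q = none := by
  rw [List.find?_eq_none] at *
  exact fun x hx hq => h x hx (himp x hq)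

-- ===== VERDICT (by name: the statement is the Claim_ definition above) =====
theorem pick_icon_from_collection_spec : Claim_equal_pick_icon_from_collection := by
  intro icons collection category used_icons _
  unfold Spec_pick_icon_from_collection
  simp only [pick_icon_from_collection, pick_icon_from_collection_alt]
  rw [pickB_fold]
  simp only [Option.none_or]
  have hC : icons.filter (fun ic => PySem.Str.startswith ic (collection ++ ":") && !(used_icons.contains ic))
      = icons.filter (fun ic => pvColl used_icons (collection ++ ":") ic) :=
    List.filter_congr (fun x _ => by simp [pvColl])
  have hF : icons.filter (fun ic => !(used_icons.contains ic))
      = icons.filter (fun ic => pvFree used_icons ic) :=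
    List.filter_congr (fun x _ => by simp [pvFree])
  rw [hC, hF]
  by_cases hc : icons.filter (fun ic => pvColl used_icons (collection ++ ":") ic) = []
  · -- no collection candidates: both sides use the unused pool
    have hfc : icons.find? (fun ic => pvColl used_icons (collection ++ ":") ic) = none := by
      rw [← head?_filter, hc]; rfl
    have hfck : icons.find? (fun ic => pvColl used_icons (collection ++ ":") ic && pvKw (PySem.Str.lower category) ic) = none :=
      find?_none_of_imp _ _ _ (fun x hx => by
        simp only [Bool.and_eq_true] at hx; exact hx.1) hfc
    rw [if_pos hc, hfc, hfck]
    simp only [Option.isSome_none, Bool.false_eq_true, if_false]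
    by_cases hf : icons.filter (fun ic => pvFree used_icons ic) = []
    · have hfa : icons.find? (fun ic => pvFree used_icons ic) = none := by
        rw [← head?_filter, hf]; rfl
      have hfak : icons.find? (fun ic => pvFree used_icons ic && pvKw (PySem.Str.lower category) ic) = none :=
        find?_none_of_imp _ _ _ (fun x hx => by
          simp only [Bool.and_eq_true] at hx; exact hx.1) hfa
      rw [if_pos hf, hfa, hfak]
      simp
    · rw [if_neg hf, pickA_go_eq, find?_filter']
      have hfa : icons.find? (fun ic => pvFree used_icons ic) = (icons.filter (fun ic => pvFree used_icons ic)).head? :=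
        (head?_filter ..).symm
      rcases hk : icons.find? (fun x => pvFree used_icons x && pvKw (PySem.Str.lower category) x) with _ | c
      · -- no keyword match: A returns candidates[0], B returns first_any
        rcases hh : icons.filter (fun ic => pvFree used_icons ic) with _ | ⟨y, ys⟩
        · exact absurd hh hf
        · rw [hh] at hfa
          simp [hfa, PySem.List.pyGet?, PySem.List.pyIdx?, hh]
      · -- keyword match c: both return it
        have : (icons.find? (fun ic => pvFree used_icons ic)).isSome := by
          rw [hfa]
          rcases hh : icons.filter (fun ic => pvFree used_icons ic) with _ | ⟨y, ys⟩
          · exact absurd hh hf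
          · simp
        rcases ho : icons.find? (fun ic => pvFree used_icons ic) with _ | y
        · rw [ho] at this; simp at this
        · simp [ho]
  · -- collection candidates exist: both sides use them
    rw [if_neg hc]
    have hne : icons.filter (fun ic => pvColl used_icons (collection ++ ":") ic) ≠ [] := hc
    rw [if_neg hne, pickA_go_eq, find?_filter']
    have hfc : icons.find? (fun ic => pvColl used_icons (collection ++ ":") ic) = (icons.filter (fun ic => pvColl used_icons (collection ++ ":") ic)).head? :=
      (head?_filter ..).symm
    have hsome : (icons.find? (fun ic => pvColl used_icons (collection ++ ":") ic)).isSome := by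
      rw [hfc]
      rcases hh : icons.filter (fun ic => pvColl used_icons (collection ++ ":") ic) with _ | ⟨y, ys⟩
      · exact absurd hh hc
      · simp
    rw [if_pos hsome]
    rcases hk : icons.find? (fun x => pvColl used_icons (collection ++ ":") x && pvKw (PySem.Str.lower category) x) with _ | c
    · rcases hh : icons.filter (fun ic => pvColl used_icons (collection ++ ":") ic) with _ | ⟨y, ys⟩
      · exact absurd hh hc
      · rw [hh] at hfc
        simp [hfc, PySem.List.pyGet?, PySem.List.pyIdx?, hh]
    · rcases ho : icons.find? (fun ic => pvColl used_icons (collection ++ ":") ic) with _ | y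
      · rw [ho] at hsome; simp at hsome
      · simp [ho]
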